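-- pv_equiv track=rewrite | github.com/typicalgit/curses_tab_reader | tabReader.py | summarise_line
-- ===== SOURCE A (Python) =====
-- def add_ng_to_line(ng,line):
--   if line == []:
--     line = ng
--     return line
--   for ndx,note in enumerate(ng):
--     line[ndx] = str(line[ndx]) + str(note)
--   return line
--
-- def summarise_line(line):
--   gap_cnt = 0
--   ng = []
--   found = False
--   note_summary = []
--   new_line = []
--   onotes = []
--   string1 = line[0][1]
--   char_cnt = len(string1)
--   # GET OPEN NOTES
--   for string in line:
--     onotes.append(string[0])
--   onotes.insert(0,'gap')
--   #LOOP CHARS IN STRING TO GET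
--   #NDX FOR EACH CHAR IN STRINGS
--   for ndx in range(char_cnt):
--     #CHECK IF NOTE ON ANY STRING
--     for string in line:
--       ng.append(string[1][ndx])
--       if string[1][ndx] != '-':
--         found = True
--     #IF NOTE ON STRING ADD ALL
--     #NOTES TO LIST
--     if found:
--       ng.insert(0,gap_cnt)
--       note_summary = add_ng_to_line(ng,note_summary)
--       gap_cnt = 0
--     else:
--       gap_cnt += 1
--     # RESET NG AND FOUND FLAG
--     ng = []
--     found = False
--   #ADD ONOTES BACK TO STRINGS
--   for i in range(len(onotes)):
--     new_line.append([onotes[i],note_summary[i]])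
--   return new_line
-- ===== SOURCE B (Python) =====
-- def summarise_line(line):
--     # Closed-form reconstruction: find the note-bearing column indices once,
--     # then derive each output row independently (gaps from index differences,
--     # note strings by joining each string's chars at the found indices).
--     char_cnt = len(line[0][1])
--     found = [i for i in range(char_cnt) if any(s[1][i] != '-' for s in line)]
--     gaps = ''.join(str(f - p - 1) for p, f in zip([-1] + found, found))
--     return [['gap', gaps]] + [[s[0], ''.join(s[1][f] for f in found)] for s in line]
-- ===== Notes on version B (the rewrite author's own statement) =====
-- stated objective: alternative
-- what changed: B abandons A's per-column accumulator (gap counter, found flag, and the mutating add_ng_to_line merge): it computes the list of note-bearing column indices once, then reconstructs each output row independently in closed form - the gap string from consecutive index differences (f - p - 1 over zipped neighbours) and each string's note text by joining its characters at the found indices.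
-- outside the precondition, e.g. on summarise_line([['e', '-a-']]): A returns [['gap', 1], ['e', 'a']], B returns [['gap', '1'], ['e', 'a']]
import Mathlib
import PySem

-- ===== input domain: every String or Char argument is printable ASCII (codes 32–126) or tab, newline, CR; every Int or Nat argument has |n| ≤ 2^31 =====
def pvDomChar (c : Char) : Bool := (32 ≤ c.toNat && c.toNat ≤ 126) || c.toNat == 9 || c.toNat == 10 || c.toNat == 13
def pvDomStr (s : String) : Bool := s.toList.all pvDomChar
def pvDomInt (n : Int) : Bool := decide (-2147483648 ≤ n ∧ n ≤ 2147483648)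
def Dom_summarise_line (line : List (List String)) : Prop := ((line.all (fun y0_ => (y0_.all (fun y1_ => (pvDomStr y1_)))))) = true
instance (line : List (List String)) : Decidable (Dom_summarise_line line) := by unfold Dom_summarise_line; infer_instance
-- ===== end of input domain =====

-- B replaces A's per-column accumulator (gap counter, found flag, add_ng_to_line merge)
-- by a closed-form reconstruction from the list of note-bearing column indices.

-- shared helpers (exact ports of the shared Python subexpressions)
-- string[1][ndx]: a one-char string; the default is used only outside Pre_ (Python raises there)
def pvCharAt (t : String) (ndx : Nat) : String :=
  ((PySem.Str.pyGet? t (ndx : Int)).getD ' ').toString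

-- line[0][1]; defaults used only outside Pre_ (Python raises there)
def pvStr1 (line : List (List String)) : String :=
  PySem.List.pyGetD (PySem.List.pyGetD line 0 []) 1 ""

-- ===== PORT A =====
-- add_ng_to_line: for ndx,note in enumerate(ng): line[ndx] = str(line[ndx]) + str(note)
def pvAddNg (ng line : List String) : List String :=
  if line = [] then ng
  else (PySem.List.enumerate ng).foldl
        (fun acc p => PySem.List.pySetD acc p.1 (PySem.List.pyGetD acc p.1 "" ++ p.2)) line

def summarise_line (line : List (List String)) : List (List String) :=
  let char_cnt := (pvStr1 line).toList.length
  let onotes := "gap" :: line.foldl (fun acc s => acc ++ [PySem.List.pyGetD s 0 ""]) []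
  let st := (List.range char_cnt).foldl
    (fun (st : Int × List String) ndx =>
      let p := line.foldl
        (fun (q : List String × Bool) s =>
          let c := pvCharAt (PySem.List.pyGetD s 1 "") ndx
          (q.1 ++ [c], q.2 || (c != "-"))) ([], false)
      if p.2 then (0, pvAddNg (PySem.Int.toStr st.1 :: p.1) st.2)
      else (st.1 + 1, st.2)) ((0 : Int), ([] : List String))
  (List.range onotes.length).foldl
    (fun acc i => acc ++ [[PySem.List.pyGetD onotes i "", PySem.List.pyGetD st.2 i ""]]) []

-- ===== PORT B =====
-- any string holds a non-'-' note at column i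
def pvPred (line : List (List String)) (i : Nat) : Bool :=
  line.any (fun s => pvCharAt (PySem.List.pyGetD s 1 "") i != "-")

def summarise_line_alt (line : List (List String)) : List (List String) :=
  let char_cnt := (pvStr1 line).toList.length
  let found := (List.range char_cnt).filter (pvPred line)
  let gaps := PySem.Str.join ""
    (List.zipWith (fun (p : Int) (f : Nat) => PySem.Int.toStr ((f : Int) - p - 1))
      ((-1 : Int) :: found.map Int.ofNat) found)
  ["gap", gaps] ::
    line.map (fun s =>
      [PySem.List.pyGetD s 0 "",
       PySem.Str.join "" (found.map (fun f => pvCharAt (PySem.List.pyGetD s 1 "") f))])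

-- ===== PRECONDITION & SPEC =====
-- number of columns on which some string carries a non-'-' note
def pvFoundCnt (line : List (List String)) : Nat :=
  (((List.range (pvStr1 line).toList.length)).filter (pvPred line)).length

-- Pre_ excludes the inputs on which A raises IndexError (empty line, a row shorter than 2,
-- a tab string shorter than line[0][1], no found column) and the inputs with exactly one found
-- column, on which A's returned list contains a Python int (the gap count) instead of a string.
def Pre_summarise_line (line : List (List String)) : Prop :=
  line ≠ [] ∧ (∀ s ∈ line, 2 ≤ s.length) ∧
  (∀ s ∈ line, (pvStr1 line).toList.length ≤ (PySem.List.pyGetD s 1 "").toList.length) ∧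
  2 ≤ pvFoundCnt line
instance (line : List (List String)) : Decidable (Pre_summarise_line line) := by
  unfold Pre_summarise_line; infer_instance

def pvWitness_summarise_line : List (List String) := [["e", "ab-"], ["B", "-c-"]]

def Spec_summarise_line (line : List (List String)) (out : List (List String)) : Prop := out = summarise_line_alt line
instance (line : List (List String)) (out : List (List String)) : Decidable (Spec_summarise_line line out) := by unfold Spec_summarise_line; infer_instance

-- ===== CLAIM (what is proved, stated in full; the proofs are below) =====
def Claim_equal_summarise_line : Prop := ∀ (line : List (List String)), Dom_summarise_line line → Pre_summarise_line line → Spec_summarise_line line (summarise_line line)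

-- ===== LEMMAS AND PROOFS =====

-- the column of tab characters at index i
def pvCol (line : List (List String)) (i : Nat) : List String :=
  line.map (fun s => pvCharAt (PySem.List.pyGetD s 1 "") i)

-- A's group fold result as a function of the accumulated group list
def pvF (cols : List (List String)) : List String :=
  match cols with
  | [] => []
  | g :: rest => rest.foldl (fun s g' => List.zipWith (· ++ ·) s g') g

theorem pv_foldl_or {α : Type} (p : α → Bool) (l : List α) (b : Bool) :
    l.foldl (fun acc x => acc || p x) b = (b || l.any p) := by
  induction l generalizing b with
  | nil => simp
  | cons x t ih => simp [ih, Bool.or_assoc]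

theorem pv_getD_mid : ∀ (pre : List String) (y : String) (s' : List String) (d : String),
    (pre ++ y :: s').getD pre.length d = y := by
  intro pre
  induction pre with
  | nil => intro y s' d; rfl
  | cons a t ih => intro y s' d; simp

theorem pv_set_mid : ∀ (pre : List String) (y v : String) (s' : List String),
    (pre ++ y :: s').set pre.length v = pre ++ v :: s' := by
  intro pre
  induction pre with
  | nil => intro y v s'; rfl
  | cons a t ih => intro y v s'; simp

theorem pv_setfold (g : List String) : ∀ (pre s : List String), s.length = g.length →
    (PySem.List.enumerate g (pre.length : Int)).foldl
      (fun acc p => PySem.List.pySetD acc p.1 (PySem.List.pyGetD acc p.1 "" ++ p.2)) (pre ++ s)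
    = pre ++ List.zipWith (· ++ ·) s g := by
  induction g with
  | nil =>
    intro pre s h
    rw [List.length_nil, List.length_eq_zero_iff] at h
    subst h
    simp [PySem.List.enumerate_nil]
  | cons x g ih =>
    intro pre s h
    cases s with
    | nil => simp at h
    | cons y s' =>
      rw [PySem.List.enumerate_cons, List.foldl_cons]
      have hg : PySem.List.pyGetD (pre ++ y :: s') ((pre.length : Nat) : Int) "" = y := by
        rw [PySem.List.pyGetD_natCast, pv_getD_mid]
      have hs : PySem.List.pySetD (pre ++ y :: s') ((pre.length : Nat) : Int) (y ++ x)
          = pre ++ (y ++ x) :: s' := by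
        rw [PySem.List.pySetD_natCast, pv_set_mid]
      dsimp only
      rw [hg, hs]
      have h2 : (pre.length : Int) + 1 = (((pre ++ [y ++ x]).length : Nat) : Int) := by
        push_cast [List.length_append, List.length_cons]
        simp
      have h3 : pre ++ (y ++ x) :: s' = (pre ++ [y ++ x]) ++ s' := by simp
      rw [h2, h3, ih (pre ++ [y ++ x]) s' (by simpa using h)]
      simp

theorem pv_addNg_eq (g s : List String) (hlen : s.length = g.length) (hne : s ≠ []) :
    pvAddNg g s = List.zipWith (· ++ ·) s g := by
  unfold pvAddNg
  rw [if_neg hne]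
  simpa using pv_setfold g [] s hlen

theorem pv_foldZip_len : ∀ (rest : List (List String)) (s : List String),
    (∀ g ∈ rest, g.length = s.length) →
    (rest.foldl (fun s g' => List.zipWith (· ++ ·) s g') s).length = s.length := by
  intro rest
  induction rest with
  | nil => intro s _; rfl
  | cons g t ih =>
    intro s h
    rw [List.foldl_cons]
    have hz : (List.zipWith (· ++ ·) s g).length = s.length := by
      rw [List.length_zipWith, h g (by simp)]
      omega
    rw [ih (List.zipWith (· ++ ·) s g) (fun g' hg' => by rw [hz, h g' (by simp [hg'])]), hz]

theorem pvF_len (n : Nat) (cols : List (List String)) (hne : cols ≠ [])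
    (h : ∀ g ∈ cols, g.length = n) : (pvF cols).length = n := by
  cases cols with
  | nil => exact absurd rfl hne
  | cons g t =>
    have hg : g.length = n := h g (by simp)
    have := pv_foldZip_len t g (fun x hx => by rw [h x (by simp [hx]), hg])
    simpa [pvF, hg] using this

theorem pvF_append (cols : List (List String)) (g : List String) (n : Nat) (hn : 0 < n)
    (hc : ∀ x ∈ cols, x.length = n) (hg : g.length = n) :
    pvF (cols ++ [g]) = pvAddNg g (pvF cols) := by
  cases cols with
  | nil =>
    simp [pvF, pvAddNg]
  | cons c r =>
    have hlen : (pvF (c :: r)).length = n := pvF_len n (c :: r) (by simp) hc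
    have hne : pvF (c :: r) ≠ [] := by
      intro hx
      rw [hx] at hlen
      simp at hlen
      omega
    rw [pv_addNg_eq g (pvF (c :: r)) (by omega) hne]
    simp only [pvF, List.cons_append, List.foldl_append, List.foldl_cons, List.foldl_nil]

-- A's per-column loop body, named (definitionally A's lambda)
def pvStepA (line : List (List String)) (st : Int × List String) (ndx : Nat) : Int × List String :=
  let p := line.foldl
    (fun (q : List String × Bool) s =>
      let c := pvCharAt (PySem.List.pyGetD s 1 "") ndx
      (q.1 ++ [c], q.2 || (c != "-"))) ([], false)
  if p.2 then (0, pvAddNg (PySem.Int.toStr st.1 :: p.1) st.2)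
  else (st.1 + 1, st.2)

-- the grouping step used only by the proof: collect each found column as a group
def pvStepG (line : List (List String)) (st : Int × List (List String)) (ndx : Nat) :
    Int × List (List String) :=
  if pvPred line ndx then (0, st.2 ++ [PySem.Int.toStr st.1 :: pvCol line ndx])
  else (st.1 + 1, st.2)

theorem pvStepA_eq (line : List (List String)) (st : Int × List String) (ndx : Nat) :
    pvStepA line st ndx =
      (if pvPred line ndx
       then (0, pvAddNg (PySem.Int.toStr st.1 :: pvCol line ndx) st.2)
       else (st.1 + 1, st.2)) := by
  unfold pvStepA pvPred pvCol
  rw [PySem.List.foldl_prod_mk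
      (f := fun (a : List String) s => a ++ [pvCharAt (PySem.List.pyGetD s 1 "") ndx])
      (g := fun (b : Bool) s => b || (pvCharAt (PySem.List.pyGetD s 1 "") ndx != "-"))]
  rw [PySem.List.foldl_append_singleton_eq_map, pv_foldl_or]
  simp

theorem pv_fuse (line : List (List String)) : ∀ (l : List Nat) (gap : Int) (cols : List (List String)),
    (∀ g ∈ cols, g.length = line.length + 1) →
    l.foldl (pvStepA line) (gap, pvF cols)
      = ((l.foldl (pvStepG line) (gap, cols)).1, pvF (l.foldl (pvStepG line) (gap, cols)).2) := by
  intro l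
  induction l with
  | nil => intro gap cols _; rfl
  | cons ndx t ih =>
    intro gap cols h
    rw [List.foldl_cons, List.foldl_cons, pvStepA_eq]
    by_cases hc : pvPred line ndx
    · rw [if_pos hc]
      have hgstep : pvStepG line (gap, cols) ndx = (0, cols ++ [PySem.Int.toStr gap :: pvCol line ndx]) := by
        simp [pvStepG, hc]
      rw [hgstep]
      dsimp only
      have hlen : (PySem.Int.toStr gap :: pvCol line ndx).length = line.length + 1 := by
        simp [pvCol]
      rw [← pvF_append cols _ (line.length + 1) (by omega) h hlen]
      exact ih 0 (cols ++ [_]) (by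
        intro g hg
        rcases List.mem_append.1 hg with h1 | h1
        · exact h g h1
        · simp only [List.mem_singleton] at h1
          subst h1
          exact hlen)
    · rw [if_neg hc]
      have hgstep : pvStepG line (gap, cols) ndx = (gap + 1, cols) := by
        simp [pvStepG, hc]
      rw [hgstep]
      dsimp only
      exact ih (gap + 1) cols h

-- the group list built by the grouping fold, as a recursive function
def pvBG (line : List (List String)) (gap : Int) : List Nat → List (List String)
  | [] => []
  | x :: t =>
    if pvPred line x then (PySem.Int.toStr gap :: pvCol line x) :: pvBG line 0 t
    else pvBG line (gap + 1) t

theorem pvBG_foldl (line : List (List String)) : ∀ (l : List Nat) (gap : Int) (cols : List (List String)),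
    (l.foldl (pvStepG line) (gap, cols)).2 = cols ++ pvBG line gap l := by
  intro l
  induction l with
  | nil => intro gap cols; simp [pvBG]
  | cons x t ih =>
    intro gap cols
    rw [List.foldl_cons]
    by_cases hc : pvPred line x
    · simp only [pvStepG, hc, if_pos, pvBG]
      rw [ih]
      simp
    · simp only [pvStepG, hc, if_neg, Bool.false_eq_true, not_false_iff, pvBG, if_neg]
      rw [ih]

def pvCasts : List Nat → List Int := List.map Int.ofNat

theorem pvCasts_cons (x : Nat) (t : List Nat) : pvCasts (x :: t) = (x : Int) :: pvCasts t := rfl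

def pvMk (line : List (List String)) (p : Int) (f : Nat) : List String :=
  PySem.Int.toStr ((f : Int) - p - 1) :: pvCol line f

theorem pvBG_range' (line : List (List String)) : ∀ (n a : Nat) (gap : Int),
    pvBG line gap (List.range' a n)
      = List.zipWith (pvMk line)
          (((a : Int) - gap - 1) :: pvCasts ((List.range' a n).filter (pvPred line)))
          ((List.range' a n).filter (pvPred line)) := by
  intro n
  induction n with
  | zero => intro a gap; simp [pvBG]
  | succ n ih =>
    intro a gap
    rw [List.range'_succ]
    by_cases hc : pvPred line a
    · rw [List.filter_cons_of_pos hc]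
      have h1 : pvBG line gap (a :: List.range' (a + 1) n)
          = (PySem.Int.toStr gap :: pvCol line a) :: pvBG line 0 (List.range' (a + 1) n) := by
        simp [pvBG, hc]
      rw [h1, ih (a + 1) 0]
      have e1 : ((a : Int) - ((a : Int) - gap - 1) - 1) = gap := by ring
      have e2 : (((a + 1 : Nat)) : Int) - 0 - 1 = (a : Int) := by push_cast; ring
      simp only [List.zipWith_cons_cons, pvMk, pvCasts_cons, e1, e2]
    · rw [List.filter_cons_of_neg hc]
      have h1 : pvBG line gap (a :: List.range' (a + 1) n)
          = pvBG line (gap + 1) (List.range' (a + 1) n) := by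
        simp [pvBG, hc]
      rw [h1, ih (a + 1) (gap + 1)]
      congr 2
      push_cast
      ring

-- zipWith as a map over the zipped pairs
theorem pv_zipWith_zip {α β γ : Type} (f : α → β → γ) :
    ∀ (a : List α) (b : List β), List.zipWith f a b = (a.zip b).map (fun q => f q.1 q.2) := by
  intro a
  induction a with
  | nil => intro b; simp
  | cons x t ih =>
    intro b
    cases b with
    | nil => simp
    | cons y u => simp [ih]

theorem pv_zip_snd {α β : Type} :
    ∀ (a : List α) (b : List β), b.length ≤ a.length → (a.zip b).map Prod.snd = b := by
  intro a
  induction a with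
  | nil =>
    intro b hb
    simp at hb
    simp [hb]
  | cons x t ih =>
    intro b hb
    cases b with
    | nil => simp
    | cons y u =>
      simp only [List.zip_cons_cons, List.map_cons]
      rw [ih u (by simpa using hb)]

-- zipWith (++) of two maps over the same list
theorem pv_zipWith_map (l : List (List String)) (f g : List String → String) :
    List.zipWith (· ++ ·) (l.map f) (l.map g) = l.map (fun x => f x ++ g x) := by
  induction l with
  | nil => rfl
  | cons x t ih => simp [ih]

-- ''.join as a left fold of ++
theorem pv_join_cons (s : String) (t : List String) :
    PySem.Str.join "" (s :: t) = s ++ PySem.Str.join "" t := by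
  cases t with
  | nil =>
    rw [← String.toList_inj]
    simp [PySem.Str.toList_join, PySem.Chars.join, List.intercalate]
  | cons q r =>
    rw [← String.toList_inj]
    rw [String.toList_append, PySem.Str.toList_join, PySem.Str.toList_join]
    simp only [List.map_cons]
    rw [PySem.Chars.join_cons_cons]
    simp

theorem pv_foldl_join : ∀ (l : List String) (a : String),
    l.foldl (· ++ ·) a = a ++ PySem.Str.join "" l := by
  intro l
  induction l with
  | nil =>
    intro a
    rw [← String.toList_inj]
    simp [PySem.Str.toList_join, PySem.Chars.join, List.intercalate]
  | cons s t ih =>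
    intro a
    rw [List.foldl_cons, ih, pv_join_cons, String.append_assoc]

-- the transpose step: folding zipWith (++) of head-and-column groups acts independently
-- on the head slot and on each line slot
theorem pv_trans (line : List (List String)) : ∀ (qt : List (Int × Nat)) (H : String) (ψ : List String → String),
    qt.foldl (fun s q => List.zipWith (· ++ ·) s (pvMk line q.1 q.2)) (H :: line.map ψ)
      = (qt.foldl (fun a q => a ++ PySem.Int.toStr ((q.2 : Int) - q.1 - 1)) H)
        :: line.map (fun r => qt.foldl (fun a q => a ++ pvCharAt (PySem.List.pyGetD r 1 "") q.2) (ψ r)) := by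
  intro qt
  induction qt with
  | nil => intro H ψ; simp
  | cons q t ih =>
    intro H ψ
    rw [List.foldl_cons]
    have h1 : List.zipWith (· ++ ·) (H :: line.map ψ) (pvMk line q.1 q.2)
        = (H ++ PySem.Int.toStr ((q.2 : Int) - q.1 - 1))
          :: line.map (fun r => ψ r ++ pvCharAt (PySem.List.pyGetD r 1 "") q.2) := by
      simp only [pvMk, pvCol, List.zipWith_cons_cons]
      rw [pv_zipWith_map]
    rw [h1, ih]
    simp

theorem pv_foldl_snd {α β : Type} (g : String → β → String) (qt : List (α × β)) (i : String) :
    qt.foldl (fun a q => g a q.2) i = (qt.map Prod.snd).foldl g i :=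
  List.foldl_map.symm

theorem pv_join_eq_foldl (L : List String) :
    PySem.Str.join "" L = L.foldl (· ++ ·) "" := by
  rw [pv_foldl_join]
  simp

-- output assembly: the final index loop over two head-and-map lists is the zipped cons list
theorem pv_final {α : Type} (l : List α) (a b : String) (f g : α → String) :
    ((List.range (l.length + 1)).map (Nat.cast : Nat → Int)).map
      (fun (i : Int) => [PySem.List.pyGetD (a :: l.map f) i "", PySem.List.pyGetD (b :: l.map g) i ""])
    = [a, b] :: l.map (fun x => [f x, g x]) := by
  rw [List.map_map, List.range_succ_eq_map]
  simp only [List.map_cons, List.map_map, Function.comp_apply]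
  congr 1
  · simp
  · apply List.ext_getElem
    · simp
    · intro i h1 h2
      simp only [List.getElem_map, List.getElem_range, Function.comp_apply]
      rw [PySem.List.pyGetD_natCast, PySem.List.pyGetD_natCast]
      simp only [List.length_map, List.length_range] at h1 h2
      rw [List.getD_cons_succ, List.getD_cons_succ,
          List.getD_eq_getElem _ _ (by simpa using h1), List.getD_eq_getElem _ _ (by simpa using h1)]
      simp

-- ===== VERDICT (by name: the statement is the Claim_ definition above) =====
theorem summarise_line_spec : Claim_equal_summarise_line := by
  intro line _ hpre
  show summarise_line line = summarise_line_alt line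
  have hcnt := hpre.2.2.2
  unfold pvFoundCnt at hcnt
  obtain ⟨f0, F', hF0⟩ : ∃ f0 F',
      (List.range (pvStr1 line).toList.length).filter (pvPred line) = f0 :: F' := by
    cases hFc : (List.range (pvStr1 line).toList.length).filter (pvPred line) with
    | nil => rw [hFc] at hcnt; simp at hcnt
    | cons x t => exact ⟨x, t, rfl⟩
  -- the per-pair state: remaining (previous, found) index pairs
  have hNS : ((List.range (pvStr1 line).toList.length).foldl (pvStepA line)
        ((0 : Int), ([] : List String))).2
      = ((((f0 : Int)) :: pvCasts F').zip F').foldl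
          (fun a q => a ++ PySem.Int.toStr ((q.2 : Int) - q.1 - 1))
          (PySem.Int.toStr ((f0 : Int) - (-1) - 1))
        :: line.map (fun r => ((((f0 : Int)) :: pvCasts F').zip F').foldl
            (fun a q => a ++ pvCharAt (PySem.List.pyGetD r 1 "") q.2)
            (pvCharAt (PySem.List.pyGetD r 1 "") f0)) := by
    have h1 := pv_fuse line (List.range (pvStr1 line).toList.length) 0 []
      (by intro g hg; simp at hg)
    have h2 : pvF ([] : List (List String)) = [] := rfl
    rw [h2] at h1
    rw [h1]
    dsimp only
    rw [pvBG_foldl]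
    rw [List.nil_append, List.range_eq_range', pvBG_range' line _ 0 0]
    rw [← List.range_eq_range']
    have e0 : (((0 : Nat)) : Int) - 0 - 1 = (-1 : Int) := by norm_num
    rw [e0, hF0, pvCasts_cons, List.zipWith_cons_cons]
    have hpvF : pvF (pvMk line (-1) f0 :: List.zipWith (pvMk line) (((f0 : Nat) : Int) :: pvCasts F') F')
        = (List.zipWith (pvMk line) (((f0 : Nat) : Int) :: pvCasts F') F').foldl
            (fun s g' => List.zipWith (· ++ ·) s g') (pvMk line (-1) f0) := rfl
    rw [hpvF, pv_zipWith_zip, List.foldl_map]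
    have hg0 : pvMk line (-1) f0
        = PySem.Int.toStr ((f0 : Int) - (-1) - 1)
          :: line.map (fun r => pvCharAt (PySem.List.pyGetD r 1 "") f0) := rfl
    rw [hg0, pv_trans]
  -- A's output in closed form
  have honotes : line.foldl (fun acc s => acc ++ [PySem.List.pyGetD s 0 ""]) []
      = line.map (fun s => PySem.List.pyGetD s 0 "") := by
    rw [PySem.List.foldl_append_singleton_eq_map, List.nil_append]
  have hA : summarise_line line =
      ((List.range ("gap" :: line.foldl (fun acc s => acc ++ [PySem.List.pyGetD s 0 ""]) []).length).foldl
        (fun acc i => acc ++ [[PySem.List.pyGetD ("gap" :: line.foldl (fun acc s => acc ++ [PySem.List.pyGetD s 0 ""]) []) i "",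
          PySem.List.pyGetD ((List.range (pvStr1 line).toList.length).foldl (pvStepA line) ((0 : Int), ([] : List String))).2 i ""]]) []) := rfl
  rw [hA, honotes, hNS]
  rw [PySem.List.foldl_append_singleton_eq_map, List.nil_append]
  simp only [bind_pure_comp, List.map_eq_map]
  have hlen : ("gap" :: line.map (fun s => PySem.List.pyGetD s 0 "")).length = line.length + 1 := by
    simp
  rw [hlen, pv_final]
  -- B's output in closed form
  have hB : summarise_line_alt line
      = ["gap", PySem.Str.join ""
          (List.zipWith (fun (p : Int) (f : Nat) => PySem.Int.toStr ((f : Int) - p - 1))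
            ((-1 : Int) :: ((List.range (pvStr1 line).toList.length).filter (pvPred line)).map Int.ofNat)
            ((List.range (pvStr1 line).toList.length).filter (pvPred line)))] ::
        line.map (fun s =>
          [PySem.List.pyGetD s 0 "",
           PySem.Str.join "" ((((List.range (pvStr1 line).toList.length).filter (pvPred line)).map
             (fun f => pvCharAt (PySem.List.pyGetD s 1 "") f)))]) := rfl
  rw [hB, hF0]
  have hcast : (f0 :: F').map Int.ofNat = pvCasts (f0 :: F') := rfl
  rw [hcast, pvCasts_cons]
  congr 1
  · -- the gap string
    congr 1
    rw [pv_join_eq_foldl, pv_zipWith_zip, List.zip_cons_cons, List.foldl_map, List.foldl_cons]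
    simp
  · -- the note strings, row by row
    apply List.map_congr_left
    intro s _
    congr 1
    rw [pv_join_eq_foldl, List.foldl_map, List.foldl_cons]
    have hsnd : (((((f0 : Nat)) : Int) :: pvCasts F').zip F').map Prod.snd = F' := by
      apply pv_zip_snd
      simp [pvCasts]
    rw [pv_foldl_snd (fun a f => a ++ pvCharAt (PySem.List.pyGetD s 1 "") f)
        (((((f0 : Nat)) : Int) :: pvCasts F').zip F') (pvCharAt (PySem.List.pyGetD s 1 "") f0)]
    rw [hsnd]
    simp
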